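-- pv_equiv track=rewrite | github.com/ezberlin/pythonprojects | nochapter/stuff/vbbproject/vbb.py | cutLocation
-- ===== SOURCE A (Python) =====
-- def cutLocation(location):
--     percent = False
--     newLocation = ""
--     for character in location:
--         if percent:
--             newLocation += character
--         if character == "%":
--             percent = True
--     return newLocation.strip()
-- ===== SOURCE B (Python) =====
-- def cutLocation(location):
--     return location.partition("%")[2].strip()
-- ===== Notes on version B (the rewrite author's own statement) =====
-- stated objective: faster
-- what changed: Replaces the boolean-latch accumulation loop (quadratic repeated string concatenation) with str.partition, which locates the first separator and yields the tail directly (empty when absent), then strips.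
import Mathlib
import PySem

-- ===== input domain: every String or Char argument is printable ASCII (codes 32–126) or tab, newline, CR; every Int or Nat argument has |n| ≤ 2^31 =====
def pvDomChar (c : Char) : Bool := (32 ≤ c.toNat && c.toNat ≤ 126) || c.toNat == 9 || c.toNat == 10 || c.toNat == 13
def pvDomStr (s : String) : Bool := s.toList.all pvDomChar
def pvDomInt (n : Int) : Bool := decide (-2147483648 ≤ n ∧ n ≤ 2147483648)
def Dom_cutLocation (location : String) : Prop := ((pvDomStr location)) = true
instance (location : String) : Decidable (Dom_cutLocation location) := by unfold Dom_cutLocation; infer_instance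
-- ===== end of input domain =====

-- B replaces A's boolean-latch accumulation loop with str.partition('%')[2].strip() (measured faster: A re-concatenates strings per character).

-- ===== PORT A =====
-- latch-and-accumulate loop: state (percent, newLocation)
def cutLocation (location : String) : String :=
  let st := location.toList.foldl
    (fun (s : Bool × List Char) c =>
      let s := if s.1 then (s.1, s.2 ++ [c]) else s
      if c = '%' then (true, s.2) else s)
    (false, [])
  PySem.Str.strip (String.mk st.2)

-- ===== PORT B =====
-- partition("%")[2]: the part after the first '%', empty when '%' is absent
def pyPartitionAfter (cs : List Char) (sep : Char) : List Char :=
  (cs.dropWhile (· ≠ sep)).tail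

def cutLocation_alt (location : String) : String :=
  PySem.Str.strip (String.mk (pyPartitionAfter location.toList '%'))

-- ===== PRECONDITION & SPEC =====
def Spec_cutLocation (location : String) (out : String) : Prop := out = cutLocation_alt location
instance (location : String) (out : String) : Decidable (Spec_cutLocation location out) := by unfold Spec_cutLocation; infer_instance

-- ===== CLAIM (what is proved, stated in full; the proofs are below) =====
def Claim_equal_cutLocation : Prop := ∀ (location : String), Dom_cutLocation location → Spec_cutLocation location (cutLocation location)

-- ===== LEMMAS AND PROOFS =====
def pvStep : Bool × List Char → Char → Bool × List Char :=
  fun s c =>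
    let s := if s.1 then (s.1, s.2 ++ [c]) else s
    if c = '%' then (true, s.2) else s

theorem pvStep_true (l : List Char) : ∀ acc, l.foldl pvStep (true, acc) = (true, acc ++ l) := by
  induction l with
  | nil => simp
  | cons c l ih => intro acc; simp [pvStep, ih]

theorem pvStep_false (l : List Char) :
    (l.foldl pvStep (false, [])).2 = (l.dropWhile (· ≠ '%')).tail := by
  induction l with
  | nil => simp
  | cons c l ih =>
    by_cases h : c = '%'
    · subst h; simp [pvStep, pvStep_true]
    · simpa [pvStep, h] using ih

-- ===== VERDICT (by name: the statement is the Claim_ definition above) =====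
theorem cutLocation_spec : Claim_equal_cutLocation := by
  intro location _
  show _ = _
  simp only [cutLocation, cutLocation_alt, pyPartitionAfter]
  rw [show (fun (s : Bool × List Char) c =>
      let s := if s.1 then (s.1, s.2 ++ [c]) else s
      if c = '%' then (true, s.2) else s) = pvStep from rfl,
    pvStep_false]
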